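-- pv_equiv track=rewrite | github.com/Jack-The-Ripper-1820/LeetCode | 2466. Count Ways To Build Good Strings.py | countGoodStrings
-- ===== SOURCE A (Python) =====
-- def countGoodStrings(low: int, high: int, zero: int, one: int) -> int:
--     MOD = int(1e9 + 7)
--     dp = [0] * (high + 1)
--
--     dp[0] = 1
--
--     for length in range(1, high + 1):
--         if length - zero >= 0:
--             dp[length] += dp[length - zero]
--
--         if length - one >= 0:
--             dp[length] += dp[length - one]
--
--         dp[length] %= MOD
--
--     ans = 0
--     for length in range(low, high + 1):
--         ans += dp[length]
--         ans %= MOD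
--
--     return ans
-- ===== SOURCE B (Python) =====
-- def countGoodStrings(low: int, high: int, zero: int, one: int) -> int:
--     # Demand-driven top-down count: memo[i] = number of good strings whose
--     # construction has reached length i (counted by final length in [low, high]),
--     # computed with an explicit stack over the sparse set of reachable lengths.
--     MOD = 10 ** 9 + 7
--     memo = {}
--     stack = [0]
--     while stack:
--         i = stack[-1]
--         if i in memo:
--             stack.pop()
--             continue
--         pending = [j for j in (i + zero, i + one) if j <= high and j not in memo]
--         if pending:
--             stack.extend(pending)
--         else:
--             stack.pop()
--             t = 1 if i >= low else 0
--             if i + zero <= high: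
--                 t += memo[i + zero]
--             if i + one <= high:
--                 t += memo[i + one]
--             memo[i] = t % MOD
--     return memo[0]
-- ===== Notes on version B (the rewrite author's own statement) =====
-- stated objective: faster
-- what changed: B replaces A's bottom-up dense dp table (fill dp[0..high] by pulling dp[length-zero], dp[length-one], then a separate summation pass over [low,high]) with a demand-driven top-down memoized count: a dict memo and an explicit stack compute, only for the sparse set of lengths reachable as sums of zero/one blocks, f(i) = number of good strings whose construction has reached length i (with a +1 'stop here' term when low<=i<=high), and the answer is memo[0] with no summation pass.
-- outside the precondition, e.g. on countGoodStrings(-1, 2, 1, 1): A returns 11, B returns 7; on countGoodStrings(1, 3, 1, 0): A returns 14, B does not finish within the time limit; on countGoodStrings(0, 0, -1, 1): A returns 1, B does not finish within the time limit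
import Mathlib
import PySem

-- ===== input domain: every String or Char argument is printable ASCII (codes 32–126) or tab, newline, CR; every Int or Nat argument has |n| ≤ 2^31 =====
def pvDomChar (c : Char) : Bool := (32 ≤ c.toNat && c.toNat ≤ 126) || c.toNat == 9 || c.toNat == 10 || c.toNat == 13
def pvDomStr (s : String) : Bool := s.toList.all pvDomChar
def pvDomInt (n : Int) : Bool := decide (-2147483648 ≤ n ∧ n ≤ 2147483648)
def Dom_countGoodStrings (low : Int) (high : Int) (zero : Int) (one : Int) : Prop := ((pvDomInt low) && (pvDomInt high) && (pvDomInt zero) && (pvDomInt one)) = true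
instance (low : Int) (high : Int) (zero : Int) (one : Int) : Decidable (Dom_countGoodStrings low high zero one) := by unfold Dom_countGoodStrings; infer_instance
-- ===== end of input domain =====

-- B replaces A's bottom-up dense dp table + separate summation pass by a demand-driven top-down
-- memoized count (dict + explicit stack over the reachable lengths only); same asymptotic cost.

-- ===== PORT A =====
-- one iteration of A's dp-filling loop (body of 'for length in range(1, high+1)')
def aStep (zero one : Int) (dp : Array Int) (length : Int) : Array Int :=
  let dp := if length - zero ≥ 0 then
      dp.setIfInBounds length.toNat (dp.getD length.toNat 0 + dp.getD (length - zero).toNat 0)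
    else dp
  let dp := if length - one ≥ 0 then
      dp.setIfInBounds length.toNat (dp.getD length.toNat 0 + dp.getD (length - one).toNat 0)
    else dp
  dp.setIfInBounds length.toNat (PySem.Int.mod (dp.getD length.toNat 0) 1000000007)

def countGoodStrings (low : Int) (high : Int) (zero : Int) (one : Int) : Int :=
  let dp : Array Int := Array.replicate (high + 1).toNat 0
  let dp := dp.setIfInBounds 0 1
  let dp := (PySem.List.pyRange 1 (high + 1) 1).foldl (aStep zero one) dp
  (PySem.List.pyRange low (high + 1) 1).foldl
    (fun ans length => PySem.Int.mod (ans + dp.getD length.toNat 0) 1000000007) 0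

-- ===== PORT B =====
-- B's memo is a Python dict whose keys are exactly ints in [0, high]; it is represented here as an
-- Array (Option Int) indexed by the key ('j in memo' = (mget memo j).isSome, 'memo[j] = v' = mset),
-- which is exact for this key range (and evaluable); out-of-range/negative keys read as absent.
def mget (memo : Array (Option Int)) (j : Int) : Option Int :=
  if 0 ≤ j then memo.getD j.toNat none else none

def mset (memo : Array (Option Int)) (j : Int) (v : Int) : Array (Option Int) :=
  memo.setIfInBounds j.toNat (some v)

-- B's while loop. The stack is a List Int with the TOP at the HEAD (Python keeps the top at the
-- end: stack[-1] ~ head, stack.pop() ~ tail, stack.extend(pending) ~ pending.reverse ++ ·).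
-- The fuel argument only makes the recursion total; under Pre_ it is proved sufficient and the
-- loop always ends by emptying the stack, exactly as the Python while loop does.
def bLoop (low high zero one : Int) : Nat → Array (Option Int) → List Int → Array (Option Int)
  | _, memo, [] => memo
  | 0, memo, _ :: _ => memo
  | fuel + 1, memo, i :: rest =>
    if (mget memo i).isSome then
      bLoop low high zero one fuel memo rest
    else
      let pending := [i + zero, i + one].filter (fun j => decide (j ≤ high) && (mget memo j).isNone)
      if pending.isEmpty then
        let t : Int := if i ≥ low then 1 else 0
        -- memo[i+zero] / memo[i+one]: the key is present whenever the branch is taken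
        -- (pending is empty), so (mget _ _).getD 0 is exact for Python's memo[_]
        let t : Int := if i + zero ≤ high then t + (mget memo (i + zero)).getD 0 else t
        let t : Int := if i + one ≤ high then t + (mget memo (i + one)).getD 0 else t
        bLoop low high zero one fuel (mset memo i (PySem.Int.mod t 1000000007)) rest
      else
        bLoop low high zero one fuel memo (pending.reverse ++ i :: rest)

def countGoodStrings_alt (low : Int) (high : Int) (zero : Int) (one : Int) : Int :=
  let memo := bLoop low high zero one (4 * (high + 2)).toNat
    (Array.replicate (high + 1).toNat none) [0]
  -- memo[0]: under Pre_ the key 0 is always present when the loop ends, so getD is exact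
  (mget memo 0).getD 0

-- ===== PRECONDITION & SPEC =====
-- Pre_ restricts to the problem's natural domain: negative low (A returns a value via Python
-- negative-index wraparound in its summation pass), negative high (A raises IndexError on dp[0])
-- and nonpositive zero/one (degenerate block lengths: A raises or returns, B does not terminate)
-- are excluded.
def Pre_countGoodStrings (low : Int) (high : Int) (zero : Int) (one : Int) : Prop :=
  0 ≤ low ∧ 0 ≤ high ∧ 1 ≤ zero ∧ 1 ≤ one
instance (low : Int) (high : Int) (zero : Int) (one : Int) : Decidable (Pre_countGoodStrings low high zero one) := by unfold Pre_countGoodStrings; infer_instance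

def pvWitness_countGoodStrings : Int × Int × Int × Int := (2, 4, 1, 2)

def Spec_countGoodStrings (low : Int) (high : Int) (zero : Int) (one : Int) (out : Int) : Prop := out = countGoodStrings_alt low high zero one
instance (low : Int) (high : Int) (zero : Int) (one : Int) (out : Int) : Decidable (Spec_countGoodStrings low high zero one out) := by unfold Spec_countGoodStrings; infer_instance

-- ===== CLAIM (what is proved, stated in full; the proofs are below) =====
def Claim_equal_countGoodStrings : Prop := ∀ (low : Int) (high : Int) (zero : Int) (one : Int), Dom_countGoodStrings low high zero one → Pre_countGoodStrings low high zero one → Spec_countGoodStrings low high zero one (countGoodStrings low high zero one)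

-- ===== LEMMAS AND PROOFS =====

-- ---------- shared arithmetic ----------
lemma mod_pos_eq (x : Int) : PySem.Int.mod x 1000000007 = x % 1000000007 :=
  PySem.Int.mod_eq_emod_of_pos (by norm_num)

-- ---------- the A-side value: dp[j] mod 1e9+7 ----------
def gsp (z o : Nat) : Nat → Int
  | 0 => 1
  | (j+1) =>
      ((if 1 ≤ z ∧ z ≤ j+1 then gsp z o (j+1-z) else 0) +
       (if 1 ≤ o ∧ o ≤ j+1 then gsp z o (j+1-o) else 0)) % 1000000007
termination_by j => j
decreasing_by all_goals omega

-- ans after summing the first k dp entries in A's second loop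
def aacc (l z o : Nat) : Nat → Int
  | 0 => 0
  | (k+1) => if l ≤ k then (aacc l z o k + gsp z o k) % 1000000007 else aacc l z o k

-- ---------- array-as-function machinery for port A ----------
lemma getD_map_range (f : Nat → Int) (m k : Nat) (h : k < m) :
    ((List.range m).map f).getD k 0 = f k := by
  rw [List.getD_eq_getElem?_getD]
  simp [h]

lemma set_map_range (f : Nat → Int) (m k : Nat) (v : Int) (hk : k < m) :
    ((List.range m).map f).set k v = (List.range m).map (fun j => if j = k then v else f j) := by
  apply List.ext_getElem
  · simp
  · intro i h1 h2
    simp only [List.getElem_set, List.getElem_map, List.getElem_range]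
    by_cases hik : i = k
    · simp [hik]
    · have hki : k ≠ i := fun h => hik h.symm
      simp [hik, hki]

def rngA (m : Nat) (f : Nat → Int) : Array Int := ((List.range m).map f).toArray

lemma toArray_getD (l : List Int) (k : Nat) : (l.toArray).getD k 0 = l.getD k 0 := by
  simp only [Array.getD, List.getD, List.size_toArray, List.getElem_toArray]
  split_ifs with h
  · simp [List.getElem?_eq_getElem h]
  · simp [List.getElem?_eq_none_iff.mpr (by omega : l.length ≤ k)]

lemma rngA_getD (f : Nat → Int) (m k : Nat) (hk : k < m) :
    (rngA m f).getD k 0 = f k := by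
  rw [rngA, toArray_getD]
  exact getD_map_range f m k hk

lemma rngA_set (f : Nat → Int) (m k : Nat) (v : Int) (hk : k < m) :
    (rngA m f).setIfInBounds k v = rngA m (fun j => if j = k then v else f j) := by
  rw [rngA, List.setIfInBounds_toArray, set_map_range f m k v hk, rngA]

lemma rngA_congr (m : Nat) (f g : Nat → Int) (h : ∀ t, t < m → f t = g t) :
    rngA m f = rngA m g := by
  unfold rngA
  congr 1
  apply List.map_congr_left
  intro t ht
  exact h t (List.mem_range.mp ht)

lemma init_eq (m : Nat) (hm : 0 < m) :
    (Array.replicate m (0:Int)).setIfInBounds 0 1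
      = rngA m (fun j => if j = 0 then (1:Int) else 0) := by
  have hrep : Array.replicate m (0:Int) = (List.replicate m (0:Int)).toArray := by simp
  have hrep2 : (List.replicate m (0:Int)) = (List.range m).map (fun _ => (0:Int)) := by
    apply List.ext_getElem <;> simp
  rw [hrep, hrep2, List.setIfInBounds_toArray, set_map_range _ m 0 1 hm, rngA]

-- ---------- A-side: the dp loop fills prefix values of gsp ----------
lemma aStep_apply (z o n j : Nat) (hz : 1 ≤ z) (ho : 1 ≤ o) (hj1 : 1 ≤ j) (hj : j ≤ n) :
    aStep (z:Int) (o:Int) (rngA (n+1) (fun t => if t < j then gsp z o t else 0)) (j : Int)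
      = rngA (n+1) (fun t => if t < j+1 then gsp z o t else 0) := by
  have hjn : j < n + 1 := by omega
  simp only [aStep, Int.toNat_natCast]
  by_cases hzj : z ≤ j
  · by_cases hoj : o ≤ j
    · rw [if_pos (show (j:Int) - (z:Int) ≥ 0 by omega),
          show ((j:Int) - (z:Int)).toNat = j - z by omega,
          rngA_getD _ _ _ hjn, rngA_getD _ _ _ (by omega),
          rngA_set _ _ _ _ hjn]
      rw [if_pos (show (j:Int) - (o:Int) ≥ 0 by omega),
          show ((j:Int) - (o:Int)).toNat = j - o by omega,
          rngA_getD _ _ _ hjn, rngA_getD _ _ _ (by omega),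
          rngA_set _ _ _ _ hjn]
      rw [rngA_getD _ _ _ hjn, rngA_set _ _ _ _ hjn]
      apply rngA_congr
      intro t htm
      by_cases htj : t = j
      · subst htj
        obtain ⟨j', rfl⟩ : ∃ j', t = j' + 1 := ⟨t - 1, by omega⟩
        rw [gsp]
        have e0 : ¬ (j' + 1 < j' + 1) := by omega
        have e1 : j' + 1 < j' + 1 + 1 := by omega
        have e2 : j' + 1 - z < j' + 1 := by omega
        have e3 : j' + 1 - o < j' + 1 := by omega
        have e4 : ¬ (j' + 1 - z = j' + 1) := by omega
        have e5 : ¬ (j' + 1 - o = j' + 1) := by omega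
        have hc1 : (1 ≤ z ∧ z ≤ j' + 1) := by omega
        have hc2 : (1 ≤ o ∧ o ≤ j' + 1) := by omega
        simp [e0, e1, e2, e3, e4, e5, hc1, hc2, mod_pos_eq]
      · have hlt : (t < j) = (t < j + 1) := propext (by constructor <;> intro <;> omega)
        simp only [if_neg htj, hlt]
    · rw [if_pos (show (j:Int) - (z:Int) ≥ 0 by omega),
          show ((j:Int) - (z:Int)).toNat = j - z by omega,
          rngA_getD _ _ _ hjn, rngA_getD _ _ _ (by omega),
          rngA_set _ _ _ _ hjn]
      rw [if_neg (show ¬ ((j:Int) - (o:Int) ≥ 0) by omega)]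
      rw [rngA_getD _ _ _ hjn, rngA_set _ _ _ _ hjn]
      apply rngA_congr
      intro t htm
      by_cases htj : t = j
      · subst htj
        obtain ⟨j', rfl⟩ : ∃ j', t = j' + 1 := ⟨t - 1, by omega⟩
        rw [gsp]
        have e0 : ¬ (j' + 1 < j' + 1) := by omega
        have e1 : j' + 1 < j' + 1 + 1 := by omega
        have e2 : j' + 1 - z < j' + 1 := by omega
        have e3 : j' + 1 - o < j' + 1 := by omega
        have e4 : ¬ (j' + 1 - z = j' + 1) := by omega
        have e5 : ¬ (j' + 1 - o = j' + 1) := by omega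
        have hc1 : (1 ≤ z ∧ z ≤ j' + 1) := by omega
        have hc2 : ¬ (1 ≤ o ∧ o ≤ j' + 1) := by omega
        simp [e0, e1, e2, e3, e4, e5, hc1, hc2, mod_pos_eq]
      · have hlt : (t < j) = (t < j + 1) := propext (by constructor <;> intro <;> omega)
        simp only [if_neg htj, hlt]
  · by_cases hoj : o ≤ j
    · rw [if_neg (show ¬ ((j:Int) - (z:Int) ≥ 0) by omega)]
      rw [if_pos (show (j:Int) - (o:Int) ≥ 0 by omega),
          show ((j:Int) - (o:Int)).toNat = j - o by omega,
          rngA_getD _ _ _ hjn, rngA_getD _ _ _ (by omega),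
          rngA_set _ _ _ _ hjn]
      rw [rngA_getD _ _ _ hjn, rngA_set _ _ _ _ hjn]
      apply rngA_congr
      intro t htm
      by_cases htj : t = j
      · subst htj
        obtain ⟨j', rfl⟩ : ∃ j', t = j' + 1 := ⟨t - 1, by omega⟩
        rw [gsp]
        have e0 : ¬ (j' + 1 < j' + 1) := by omega
        have e1 : j' + 1 < j' + 1 + 1 := by omega
        have e2 : j' + 1 - z < j' + 1 := by omega
        have e3 : j' + 1 - o < j' + 1 := by omega
        have e4 : ¬ (j' + 1 - z = j' + 1) := by omega
        have e5 : ¬ (j' + 1 - o = j' + 1) := by omega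
        have hc1 : ¬ (1 ≤ z ∧ z ≤ j' + 1) := by omega
        have hc2 : (1 ≤ o ∧ o ≤ j' + 1) := by omega
        simp [e0, e1, e2, e3, e4, e5, hc1, hc2, mod_pos_eq]
      · have hlt : (t < j) = (t < j + 1) := propext (by constructor <;> intro <;> omega)
        simp only [if_neg htj, hlt]
    · rw [if_neg (show ¬ ((j:Int) - (z:Int) ≥ 0) by omega)]
      rw [if_neg (show ¬ ((j:Int) - (o:Int) ≥ 0) by omega)]
      rw [rngA_getD _ _ _ hjn, rngA_set _ _ _ _ hjn]
      apply rngA_congr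
      intro t htm
      by_cases htj : t = j
      · subst htj
        obtain ⟨j', rfl⟩ : ∃ j', t = j' + 1 := ⟨t - 1, by omega⟩
        rw [gsp]
        have e0 : ¬ (j' + 1 < j' + 1) := by omega
        have e1 : j' + 1 < j' + 1 + 1 := by omega
        have e2 : j' + 1 - z < j' + 1 := by omega
        have e3 : j' + 1 - o < j' + 1 := by omega
        have e4 : ¬ (j' + 1 - z = j' + 1) := by omega
        have e5 : ¬ (j' + 1 - o = j' + 1) := by omega
        have hc1 : ¬ (1 ≤ z ∧ z ≤ j' + 1) := by omega
        have hc2 : ¬ (1 ≤ o ∧ o ≤ j' + 1) := by omega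
        simp [e0, e1, e2, e3, e4, e5, hc1, hc2, mod_pos_eq]
      · have hlt : (t < j) = (t < j + 1) := propext (by constructor <;> intro <;> omega)
        simp only [if_neg htj, hlt]

lemma Aloop (z o n : Nat) (hz : 1 ≤ z) (ho : 1 ≤ o) :
    ∀ k, k ≤ n →
      (PySem.List.pyRange 1 ((k:Int)+1) 1).foldl (aStep (z:Int) (o:Int))
          (rngA (n+1) (fun j => if j = 0 then (1:Int) else 0))
        = rngA (n+1) (fun t => if t < k+1 then gsp z o t else 0) := by
  intro k
  induction k with
  | zero =>
    intro _
    rw [show ((0:Nat):Int) + 1 = 1 by norm_num, PySem.List.pyRange_one_eq_nil (by norm_num)]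
    rw [List.foldl_nil]
    apply rngA_congr
    intro t _
    by_cases ht : t = 0
    · simp [ht, gsp]
    · have : ¬ (t < 0 + 1) := by omega
      simp [ht, this]
  | succ k ih =>
    intro hk
    rw [show (((k+1:Nat)):Int) + 1 = (((k:Nat):Int) + 1) + 1 by push_cast; ring,
        PySem.List.pyRange_one_succ_right (by omega : (1:Int) ≤ ((k:Nat):Int) + 1),
        List.foldl_append, ih (by omega), List.foldl_cons, List.foldl_nil,
        show ((k:Nat):Int) + 1 = (((k+1:Nat)):Int) by push_cast; ring,
        aStep_apply z o n (k+1) hz ho (by omega) (by omega)]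

-- ---------- A-side: the summation loop equals aacc ----------
lemma Asum (l z o n : Nat) :
    ∀ k, k ≤ n+1 →
      (PySem.List.pyRange (l:Int) (k:Int) 1).foldl
          (fun ans length =>
            PySem.Int.mod (ans + (rngA (n+1) (gsp z o)).getD length.toNat 0) 1000000007) 0
        = aacc l z o k := by
  intro k
  induction k with
  | zero =>
    intro _
    rw [show (((0:Nat)):Int) = 0 by norm_num, PySem.List.pyRange_one_eq_nil (by omega),
        List.foldl_nil, aacc]
  | succ k ih =>
    intro hk
    by_cases hlk : l ≤ k
    · rw [show (((k+1:Nat)):Int) = ((k:Nat):Int) + 1 by push_cast; ring,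
          PySem.List.pyRange_one_succ_right (by omega : ((l:Nat):Int) ≤ ((k:Nat):Int)),
          List.foldl_append, ih (by omega), List.foldl_cons, List.foldl_nil]
      simp only [Int.toNat_natCast]
      rw [rngA_getD (gsp z o) (n+1) k (by omega), mod_pos_eq, aacc, if_pos hlk]
    · rw [PySem.List.pyRange_one_eq_nil (by omega : (((k+1:Nat)):Int) ≤ ((l:Nat):Int)),
          List.foldl_nil, aacc, if_neg hlk, ← ih (by omega),
          PySem.List.pyRange_one_eq_nil (by omega : ((k:Nat):Int) ≤ ((l:Nat):Int)),
          List.foldl_nil]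

lemma A_eq (l n z o : Nat) (hz : 1 ≤ z) (ho : 1 ≤ o) :
    countGoodStrings (l:Int) (n:Int) (z:Int) (o:Int) = aacc l z o (n+1) := by
  simp only [countGoodStrings]
  rw [show (((n:Nat):Int) + 1).toNat = n + 1 by omega, init_eq (n+1) (by omega)]
  rw [Aloop z o n hz ho n le_rfl]
  have hdp : rngA (n+1) (fun t => if t < n+1 then gsp z o t else 0)
      = rngA (n+1) (gsp z o) := by
    apply rngA_congr
    intro t htm
    rw [if_pos htm]
  rw [hdp, show ((n:Nat):Int) + 1 = (((n+1:Nat)):Int) by push_cast; ring,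
      Asum l z o n (n+1) le_rfl]

-- ---------- the unmodded count and the combinatorial bridge ----------
-- pcnt zp op j = number of block sequences (blocks of lengths zp+1 and op+1) of total length j
def pcnt (zp op : Nat) : Nat → Nat
  | 0 => 1
  | (j+1) =>
      (if zp + 1 ≤ j + 1 then pcnt zp op (j + 1 - (zp+1)) else 0) +
      (if op + 1 ≤ j + 1 then pcnt zp op (j + 1 - (op+1)) else 0)
termination_by j => j
decreasing_by all_goals omega

lemma add_mod_mod (a b : Int) : (a % 1000000007 + b % 1000000007) % 1000000007 = (a + b) % 1000000007 :=
  (Int.add_emod a b 1000000007).symm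

lemma gsp_eq_pcnt (zp op : Nat) : ∀ j, gsp (zp+1) (op+1) j = ((pcnt zp op j : Nat) : Int) % 1000000007 := by
  intro j
  induction j using Nat.strong_induction_on with
  | _ j ih =>
    match j with
    | 0 => simp [gsp, pcnt]
    | (j+1) =>
      rw [gsp, pcnt]
      by_cases h1 : zp + 1 ≤ j + 1 <;> by_cases h2 : op + 1 ≤ j + 1
      · rw [if_pos ⟨by omega, h1⟩, if_pos ⟨by omega, h2⟩, if_pos h1, if_pos h2,
            ih _ (by omega : j + 1 - (zp+1) < j + 1), ih _ (by omega : j + 1 - (op+1) < j + 1)]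
        push_cast
        exact add_mod_mod _ _
      · rw [if_pos ⟨by omega, h1⟩, if_neg (fun h => h2 h.2), if_pos h1, if_neg h2,
            ih _ (by omega : j + 1 - (zp+1) < j + 1)]
        push_cast
        rw [add_zero, add_zero, Int.emod_emod_of_dvd _ dvd_rfl]
      · rw [if_neg (fun h => h1 h.2), if_pos ⟨by omega, h2⟩, if_neg h1, if_pos h2,
            ih _ (by omega : j + 1 - (op+1) < j + 1)]
        push_cast
        rw [zero_add, zero_add, Int.emod_emod_of_dvd _ dvd_rfl]
      · rw [if_neg (fun h => h1 h.2), if_neg (fun h => h2 h.2), if_neg h1, if_neg h2]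
        simp

-- tsumB l zp op k = Σ_{t<k, l≤t} pcnt t
def tsumB (l zp op : Nat) (k : Nat) : Nat :=
  ((List.range k).map (fun t => if l ≤ t then pcnt zp op t else 0)).sum

lemma aacc_eq_tsumB (l zp op : Nat) : ∀ k, aacc l (zp+1) (op+1) k = ((tsumB l zp op k : Nat) : Int) % 1000000007 := by
  intro k
  induction k with
  | zero => simp [aacc, tsumB]
  | succ k ih =>
    rw [aacc]
    by_cases hlk : l ≤ k
    · rw [if_pos hlk, ih, gsp_eq_pcnt, add_mod_mod]
      have ht : tsumB l zp op (k+1) = tsumB l zp op k + pcnt zp op k := by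
        unfold tsumB
        rw [List.range_succ]
        simp [hlk]
      rw [ht]
      push_cast
      ring_nf
    · rw [if_neg hlk, ih]
      have ht : tsumB l zp op (k+1) = tsumB l zp op k := by
        unfold tsumB
        rw [List.range_succ]
        simp [hlk]
      rw [ht]

-- vsum: Σ_{i ≤ t ≤ n, l ≤ t} pcnt (t - i), written with offsets d = t - i
def vsum (l zp op n i : Nat) : Nat :=
  ((List.range (n + 1 - i)).map (fun d => if l ≤ i + d then pcnt zp op d else 0)).sum

lemma vsum_zero (l zp op n : Nat) : vsum l zp op n 0 = tsumB l zp op (n+1) := by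
  unfold vsum tsumB
  simp

-- usum: the suffix count, unmodded
def usum (l n zp op : Nat) (i : Nat) : Nat :=
  (if l ≤ i then 1 else 0)
    + (if _h : i + (zp+1) ≤ n then usum l n zp op (i + (zp+1)) else 0)
    + (if _h : i + (op+1) ≤ n then usum l n zp op (i + (op+1)) else 0)
termination_by n + 1 - i
decreasing_by all_goals omega

-- generic: sum of a map of pointwise sums splits
lemma sum_map_split (L : List Nat) (f g : Nat → Nat) :
    (L.map (fun d => f d + g d)).sum = (L.map f).sum + (L.map g).sum := by
  induction L with
  | nil => simp
  | cons a L ih => simp [ih]; omega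

-- shifted-sum reindex: a map vanishing below s over range (s + r)
lemma sum_map_shift (s r : Nat) (f : Nat → Nat) :
    ((List.range (s + r)).map (fun d => if s ≤ d then f d else 0)).sum
      = ((List.range r).map (fun e => f (s + e))).sum := by
  rw [List.range_add, List.map_append, List.sum_append]
  have h1 : ((List.range s).map (fun d => if s ≤ d then f d else 0)).sum = 0 := by
    apply List.sum_eq_zero
    intro x hx
    simp only [List.mem_map, List.mem_range] at hx
    obtain ⟨d, hd, rfl⟩ := hx
    rw [if_neg (by omega)]
  rw [h1, zero_add, List.map_map]
  apply congrArg
  apply List.map_congr_left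
  intro d hd
  simp only [Function.comp]
  rw [if_pos (by omega)]

lemma sum_map_zero_of (m : Nat) (f : Nat → Nat) (h : ∀ d, d < m → f d = 0) :
    ((List.range m).map f).sum = 0 := by
  apply List.sum_eq_zero
  intro x hx
  simp only [List.mem_map, List.mem_range] at hx
  obtain ⟨d, hd, rfl⟩ := hx
  exact h d hd

lemma usum_eq_vsum (l zp op n : Nat) : ∀ i, i ≤ n → usum l n zp op i = vsum l zp op n i := by
  suffices h : ∀ m i, n + 1 - i ≤ m → i ≤ n → usum l n zp op i = vsum l zp op n i by
    intro i hi
    exact h (n+1) i (by omega) hi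
  intro m
  induction m with
  | zero =>
    intro i hm hi
    omega
  | succ m ih =>
    intro i hm hi
    rw [usum, vsum]
    have hsplit : n + 1 - i = 1 + (n - i) := by omega
    rw [hsplit, List.range_add, List.map_append, List.sum_append, List.map_map]
    have h0 : ((List.range 1).map (fun d => if l ≤ i + d then pcnt zp op d else 0)).sum
        = (if l ≤ i then 1 else 0) := by
      simp [List.range_succ, pcnt]
    rw [h0]
    have hshift : ((List.range (n - i)).map ((fun d => if l ≤ i + d then pcnt zp op d else 0) ∘ fun x => 1 + x)).sum
        = ((List.range (n - i)).map (fun d => (if zp ≤ d then (if l ≤ i + (d + 1) then pcnt zp op (d - zp) else 0) else 0)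
            + (if op ≤ d then (if l ≤ i + (d + 1) then pcnt zp op (d - op) else 0) else 0))).sum := by
      apply congrArg
      apply List.map_congr_left
      intro d hd
      simp only [Function.comp]
      rw [show (1 + d) = d + 1 by omega, pcnt]
      by_cases hzd : zp ≤ d <;> by_cases hod : op ≤ d <;> by_cases hld : l ≤ i + (d + 1) <;>
        simp [hzd, hod, hld,
          (show (zp + 1 ≤ d + 1) ↔ zp ≤ d from by omega),
          (show (op + 1 ≤ d + 1) ↔ op ≤ d from by omega),
          (show d + 1 - (zp + 1) = d - zp from by omega),
          (show d + 1 - (op + 1) = d - op from by omega)]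
    rw [hshift, sum_map_split]
    have hbranch : ∀ s : Nat,
        ((List.range (n - i)).map (fun d => if s ≤ d then (if l ≤ i + (d + 1) then pcnt zp op (d - s) else 0) else 0)).sum
          = (if _h : i + (s+1) ≤ n then vsum l zp op n (i + (s+1)) else 0) := by
      intro s
      by_cases hsn : i + (s+1) ≤ n
      · rw [dif_pos hsn, show n - i = s + (n - i - s) by omega, sum_map_shift]
        unfold vsum
        rw [show n + 1 - (i + (s+1)) = n - i - s by omega]
        apply congrArg
        apply List.map_congr_left
        intro e he
        rw [show s + e - s = e by omega]
        by_cases hle : l ≤ i + (s + e + 1)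
        · rw [if_pos (by omega : l ≤ i + (s + e + 1)), if_pos (by omega : l ≤ i + (s+1) + e)]
        · rw [if_neg (by omega : ¬ (l ≤ i + (s + e + 1))), if_neg (by omega : ¬ (l ≤ i + (s+1) + e))]
      · rw [dif_neg hsn]
        apply sum_map_zero_of
        intro d hd
        rw [if_neg (by omega)]
    rw [hbranch zp, hbranch op]
    by_cases hz : i + (zp+1) ≤ n <;> by_cases ho : i + (op+1) ≤ n <;>
      simp only [dif_pos, dif_neg, hz, ho, dite_false] <;>
      (try rw [ih (i + (zp+1)) (by omega) (by omega)]) <;>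
      (try rw [ih (i + (op+1)) (by omega) (by omega)]) <;>
      omega

-- fsuf: the suffix count mod 1e9+7 — exactly the value B memoizes at i
def fsuf (l n zp op : Nat) (i : Nat) : Int :=
  ((if l ≤ i then (1:Int) else 0)
    + (if _h : i + (zp+1) ≤ n then fsuf l n zp op (i + (zp+1)) else 0)
    + (if _h : i + (op+1) ≤ n then fsuf l n zp op (i + (op+1)) else 0)) % 1000000007
termination_by n + 1 - i
decreasing_by all_goals omega

lemma mod_absorb2 (a c : Int) :
    (a + c % 1000000007) % 1000000007 = (a + c) % 1000000007 := by
  have hc : c % 1000000007 % 1000000007 = c % 1000000007 := Int.emod_emod_of_dvd c dvd_rfl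
  conv_lhs => rw [Int.add_emod, hc]
  conv_rhs => rw [Int.add_emod]

lemma mod_absorb (a b c : Int) :
    (a + b % 1000000007 + c % 1000000007) % 1000000007 = (a + b + c) % 1000000007 := by
  have hb : b % 1000000007 % 1000000007 = b % 1000000007 := Int.emod_emod_of_dvd b dvd_rfl
  have hc : c % 1000000007 % 1000000007 = c % 1000000007 := Int.emod_emod_of_dvd c dvd_rfl
  conv_lhs => rw [Int.add_emod, Int.add_emod a (b % 1000000007), hb, hc]
  conv_rhs => rw [Int.add_emod, Int.add_emod a b]

lemma fsuf_eq_usum (l n zp op : Nat) : ∀ i, fsuf l n zp op i = ((usum l n zp op i : Nat) : Int) % 1000000007 := by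
  suffices h : ∀ m i, n + 1 - i ≤ m → fsuf l n zp op i = ((usum l n zp op i : Nat) : Int) % 1000000007 by
    intro i
    exact h (n+1) i (by omega)
  intro m
  induction m with
  | zero =>
    intro i hm
    rw [fsuf, usum, dif_neg (by omega : ¬ (i + (zp+1) ≤ n)), dif_neg (by omega : ¬ (i + (op+1) ≤ n)),
        dif_neg (by omega : ¬ (i + (zp+1) ≤ n)), dif_neg (by omega : ¬ (i + (op+1) ≤ n))]
    by_cases hl : l ≤ i <;> simp [hl]
  | succ m ih =>
    intro i hm
    rw [fsuf, usum]
    by_cases hz : i + (zp+1) ≤ n <;> by_cases ho : i + (op+1) ≤ n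
    · rw [dif_pos hz, dif_pos ho, dif_pos hz, dif_pos ho,
          ih _ (by omega), ih _ (by omega), mod_absorb]
      push_cast
      ring_nf
    · rw [dif_pos hz, dif_neg ho, dif_pos hz, dif_neg ho, ih _ (by omega),
          add_zero, add_zero, mod_absorb2]
      push_cast
      ring_nf
    · rw [dif_neg hz, dif_pos ho, dif_neg hz, dif_pos ho, ih _ (by omega),
          add_zero, add_zero, mod_absorb2]
      push_cast
      ring_nf
    · rw [dif_neg hz, dif_neg ho, dif_neg hz, dif_neg ho]
      by_cases hl : l ≤ i <;> simp [hl]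

-- ---------- B-side: the stack/memo loop computes fsuf ----------
-- functional model of the memo array
def rngO (m : Nat) (g : Nat → Option Int) : Array (Option Int) := ((List.range m).map g).toArray

lemma toArrayO_getD (l : List (Option Int)) (k : Nat) : (l.toArray).getD k none = l.getD k none := by
  simp only [Array.getD, List.getD, List.size_toArray, List.getElem_toArray]
  split_ifs with h
  · simp [List.getElem?_eq_getElem h]
  · simp [List.getElem?_eq_none_iff.mpr (by omega : l.length ≤ k)]

lemma set_map_rangeO (g : Nat → Option Int) (m k : Nat) (v : Option Int) (hk : k < m) :
    ((List.range m).map g).set k v = (List.range m).map (fun j => if j = k then v else g j) := by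
  apply List.ext_getElem
  · simp
  · intro i h1 h2
    simp only [List.getElem_set, List.getElem_map, List.getElem_range]
    by_cases hik : i = k
    · simp [hik]
    · have hki : k ≠ i := fun h => hik h.symm
      simp [hik, hki]

lemma mget_rngO (g : Nat → Option Int) (m k : Nat) (hk : k < m) :
    mget (rngO m g) ((k : Nat) : Int) = g k := by
  unfold mget rngO
  rw [if_pos (by positivity), Int.toNat_natCast, toArrayO_getD, List.getD_eq_getElem?_getD]
  simp [hk]

lemma mset_rngO (g : Nat → Option Int) (m k : Nat) (v : Int) (hk : k < m) :
    mset (rngO m g) ((k : Nat) : Int) v = rngO m (fun j => if j = k then some v else g j) := by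
  unfold mset rngO
  rw [Int.toNat_natCast, List.setIfInBounds_toArray, set_map_rangeO g m k (some v) hk]

lemma rngO_init (m : Nat) : Array.replicate m (none : Option Int) = rngO m (fun _ => none) := by
  unfold rngO
  have : (List.replicate m (none : Option Int)) = (List.range m).map (fun _ => none) := by
    apply List.ext_getElem <;> simp
  rw [← this]
  simp

-- the invariant on the functional memo
def BInv (l n zp op : Nat) (g : Nat → Option Int) : Prop :=
  ∀ k, k ≤ n → ∀ v, g k = some v → v = fsuf l n zp op k

-- number of not-yet-memoized states
def UU (n : Nat) (g : Nat → Option Int) : Nat :=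
  (List.range (n+1)).countP (fun k => (g k).isNone)

def monoF (g g' : Nat → Option Int) : Prop := ∀ k v, g k = some v → g' k = some v

lemma UU_update (n : Nat) (g : Nat → Option Int) (i : Nat) (hi : i ≤ n) (hnone : g i = none)
    (v : Int) : UU n (fun k => if k = i then some v else g k) + 1 = UU n g := by
  have key : ∀ (L : List Nat), L.Nodup → i ∈ L →
      L.countP (fun k => ((if k = i then some v else g k).isNone)) + 1
        = L.countP (fun k => (g k).isNone) := by
    intro L
    induction L with
    | nil => intro _ h; cases h
    | cons a L ih =>
      intro hnd hmem
      rw [List.countP_cons, List.countP_cons]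
      by_cases ha : a = i
      · subst ha
        have hnotin : a ∉ L := (List.nodup_cons.mp hnd).1
        have htail : L.countP (fun k => ((if k = a then some v else g k).isNone))
            = L.countP (fun k => (g k).isNone) := by
          apply List.countP_congr
          intro k hk
          rw [if_neg (by rintro rfl; exact hnotin hk)]
        rw [htail]
        simp [hnone]
      · have hmem' : i ∈ L := by
          cases List.mem_cons.mp hmem with
          | inl h => exact absurd h.symm ha
          | inr h => exact h
        have hih := ih (List.nodup_cons.mp hnd).2 hmem'
        rw [if_neg ha]
        omega
  exact key (List.range (n+1)) (List.nodup_range) (List.mem_range.mpr (by omega))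

lemma UU_pos (n : Nat) (g : Nat → Option Int) (i : Nat) (hi : i ≤ n) (hnone : g i = none) :
    1 ≤ UU n g := by
  have := UU_update n g i hi hnone 0
  omega

lemma bLoop_nil (low high zero one : Int) (fuel : Nat) (memo : Array (Option Int)) :
    bLoop low high zero one fuel memo [] = memo := by
  cases fuel <;> rfl

-- unfolding one iteration of bLoop, by branch
lemma bLoop_step_memo (low high zero one : Int) (f : Nat) (memo : Array (Option Int))
    (i : Int) (rest : List Int) (h : (mget memo i).isSome = true) :
    bLoop low high zero one (f+1) memo (i :: rest) = bLoop low high zero one f memo rest := by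
  simp only [bLoop, h, if_true]

lemma bLoop_step_expand (low high zero one : Int) (f : Nat) (memo : Array (Option Int))
    (i : Int) (rest : List Int) (hn : mget memo i = none)
    (hne : ([i + zero, i + one].filter (fun j => decide (j ≤ high) && (mget memo j).isNone)) ≠ []) :
    bLoop low high zero one (f+1) memo (i :: rest)
      = bLoop low high zero one f memo
          (([i + zero, i + one].filter (fun j => decide (j ≤ high) && (mget memo j).isNone)).reverse ++ i :: rest) := by
  simp only [bLoop, hn, Option.isSome_none, Bool.false_eq_true, if_false]
  rw [if_neg (by simpa [List.isEmpty_iff] using hne)]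

lemma bLoop_step_close (low high zero one : Int) (f : Nat) (memo : Array (Option Int))
    (i : Int) (rest : List Int) (hn : mget memo i = none)
    (he : ([i + zero, i + one].filter (fun j => decide (j ≤ high) && (mget memo j).isNone)) = []) :
    bLoop low high zero one (f+1) memo (i :: rest)
      = bLoop low high zero one f
          (mset memo i (PySem.Int.mod
            ((if i + one ≤ high then
                (if i + zero ≤ high then
                    (if i ≥ low then (1:Int) else 0) + (mget memo (i + zero)).getD 0
                  else (if i ≥ low then (1:Int) else 0)) + (mget memo (i + one)).getD 0
              else
                (if i + zero ≤ high then
                    (if i ≥ low then (1:Int) else 0) + (mget memo (i + zero)).getD 0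
                  else (if i ≥ low then (1:Int) else 0)))) 1000000007)) rest := by
  simp only [bLoop, hn, Option.isSome_none, Bool.false_eq_true, if_false]
  rw [if_pos (by simp [he])]

-- one visit of node i when every dep that is ≤ n is already memoized (or i itself is)
lemma bloop_visit (l n zp op : Nat) (i : Nat) (hi : i ≤ n)
    (g : Nat → Option Int) (rest : List Int) (fuel : Nat)
    (hInv : BInv l n zp op g)
    (hdz : g i = none → i + (zp+1) ≤ n → (g (i + (zp+1))).isSome = true)
    (hdo : g i = none → i + (op+1) ≤ n → (g (i + (op+1))).isSome = true) :
    ∃ g',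
      bLoop (l:Int) (n:Int) ((zp:Int)+1) ((op:Int)+1) (fuel+1) (rngO (n+1) g) ((i:Int) :: rest)
        = bLoop (l:Int) (n:Int) ((zp:Int)+1) ((op:Int)+1) fuel (rngO (n+1) g') rest
      ∧ ((g i = some (fsuf l n zp op i) ∧ g' = g)
         ∨ (g i = none ∧ g' = (fun k => if k = i then some (fsuf l n zp op i) else g k))) := by
  have hca : (i:Int) + ((zp:Int)+1) = ((i + (zp+1) : Nat) : Int) := by push_cast; ring
  have hcb : (i:Int) + ((op:Int)+1) = ((i + (op+1) : Nat) : Int) := by push_cast; ring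
  by_cases hmem : (g i).isSome = true
  · obtain ⟨v, hv⟩ := Option.isSome_iff_exists.mp hmem
    have hval := hInv i hi v hv
    refine ⟨g, bLoop_step_memo _ _ _ _ _ _ _ _ (by rw [mget_rngO g (n+1) i (by omega), hv]; rfl),
      Or.inl ⟨by rw [hv, hval], rfl⟩⟩
  · have hn : g i = none := by
      cases h : g i with
      | none => rfl
      | some v => rw [h] at hmem; exact absurd rfl hmem
    -- the value each memoized dep carries is fsuf of that dep
    have hlook : ∀ s : Nat, i + (s+1) ≤ n → (g (i + (s+1))).isSome = true →
        (mget (rngO (n+1) g) ((i + (s+1) : Nat) : Int)).getD 0 = fsuf l n zp op (i + (s+1)) := by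
      intro s hs hsome
      obtain ⟨w, hw⟩ := Option.isSome_iff_exists.mp hsome
      rw [mget_rngO g (n+1) _ (by omega), hw, Option.getD_some, hInv _ hs _ hw]
    -- the filter throws both deps away
    have hpred : ∀ s : Nat, (g i = none → i + (s+1) ≤ n → (g (i + (s+1))).isSome = true) →
        (decide (((i + (s+1) : Nat) : Int) ≤ (n:Int)) && (mget (rngO (n+1) g) ((i + (s+1) : Nat) : Int)).isNone) = false := by
      intro s hd
      by_cases hs : i + (s+1) ≤ n
      · obtain ⟨w, hw⟩ := Option.isSome_iff_exists.mp (hd hn hs)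
        have hno : (mget (rngO (n+1) g) ((i + (s+1) : Nat) : Int)).isNone = false := by
          rw [mget_rngO g (n+1) _ (by omega), hw]
          rfl
        rw [hno, Bool.and_false]
      · have hlt : ¬ (((i + (s+1) : Nat) : Int) ≤ (n:Int)) := by push_cast; omega
        rw [decide_eq_false hlt, Bool.false_and]
    have hfilter : ([(i:Int) + ((zp:Int)+1), (i:Int) + ((op:Int)+1)].filter
        (fun j => decide (j ≤ (n:Int)) && (mget (rngO (n+1) g) j).isNone)) = [] := by
      rw [hca, hcb]
      simp only [List.filter, hpred zp hdz, hpred op hdo]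
    -- the inserted value is exactly fsuf i
    have hind : (if (i:Int) ≥ (l:Int) then (1:Int) else 0) = (if l ≤ i then (1:Int) else 0) := by
      by_cases hl : l ≤ i
      · rw [if_pos (by exact_mod_cast hl), if_pos hl]
      · rw [if_neg (by exact_mod_cast hl), if_neg hl]
    have hval : PySem.Int.mod
        ((if (i:Int) + ((op:Int)+1) ≤ (n:Int) then
            (if (i:Int) + ((zp:Int)+1) ≤ (n:Int) then
                (if (i:Int) ≥ (l:Int) then (1:Int) else 0) + (mget (rngO (n+1) g) ((i:Int) + ((zp:Int)+1))).getD 0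
              else (if (i:Int) ≥ (l:Int) then (1:Int) else 0)) + (mget (rngO (n+1) g) ((i:Int) + ((op:Int)+1))).getD 0
          else
            (if (i:Int) + ((zp:Int)+1) ≤ (n:Int) then
                (if (i:Int) ≥ (l:Int) then (1:Int) else 0) + (mget (rngO (n+1) g) ((i:Int) + ((zp:Int)+1))).getD 0
              else (if (i:Int) ≥ (l:Int) then (1:Int) else 0)))) 1000000007
        = fsuf l n zp op i := by
      rw [mod_pos_eq, hca, hcb, hind, fsuf]
      by_cases hzn : i + (zp+1) ≤ n <;> by_cases hon : i + (op+1) ≤ n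
      · rw [if_pos (by exact_mod_cast hon : ((i + (op+1) : Nat) : Int) ≤ (n:Int)),
            if_pos (by exact_mod_cast hzn : ((i + (zp+1) : Nat) : Int) ≤ (n:Int)),
            dif_pos hzn, dif_pos hon, hlook zp hzn (hdz hn hzn), hlook op hon (hdo hn hon)]
      · rw [if_neg (by exact_mod_cast hon : ¬ ((i + (op+1) : Nat) : Int) ≤ (n:Int)),
            if_pos (by exact_mod_cast hzn : ((i + (zp+1) : Nat) : Int) ≤ (n:Int)),
            dif_pos hzn, dif_neg hon, hlook zp hzn (hdz hn hzn), add_zero]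
      · rw [if_pos (by exact_mod_cast hon : ((i + (op+1) : Nat) : Int) ≤ (n:Int)),
            if_neg (by exact_mod_cast hzn : ¬ ((i + (zp+1) : Nat) : Int) ≤ (n:Int)),
            dif_neg hzn, dif_pos hon, hlook op hon (hdo hn hon), add_zero]
      · rw [if_neg (by exact_mod_cast hon : ¬ ((i + (op+1) : Nat) : Int) ≤ (n:Int)),
            if_neg (by exact_mod_cast hzn : ¬ ((i + (zp+1) : Nat) : Int) ≤ (n:Int)),
            dif_neg hzn, dif_neg hon, add_zero, add_zero]
    refine ⟨(fun k => if k = i then some (fsuf l n zp op i) else g k), ?_, Or.inr ⟨hn, rfl⟩⟩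
    rw [bLoop_step_close _ _ _ _ _ _ _ _ (by rw [mget_rngO g (n+1) i (by omega), hn]) hfilter,
        hval, mset_rngO g (n+1) i _ (by omega)]

-- consequences of the visit disjunction
lemma visit_out (l n zp op : Nat) (i : Nat) (hi : i ≤ n) (g g' : Nat → Option Int)
    (hInv : BInv l n zp op g)
    (h : (g i = some (fsuf l n zp op i) ∧ g' = g)
         ∨ (g i = none ∧ g' = (fun k => if k = i then some (fsuf l n zp op i) else g k))) :
    BInv l n zp op g' ∧ monoF g g' ∧ g' i = some (fsuf l n zp op i) ∧ UU n g' ≤ UU n g := by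
  cases h with
  | inl h =>
    rw [h.2]
    exact ⟨hInv, fun _ _ hv => hv, h.1, le_rfl⟩
  | inr h =>
    rw [h.2]
    refine ⟨?_, ?_, by simp, ?_⟩
    · intro k hk v hv
      simp only [] at hv
      by_cases hki : k = i
      · rw [if_pos hki] at hv
        rw [hki, ← Option.some_inj.mp hv]
      · rw [if_neg hki] at hv
        exact hInv k hk v hv
    · intro k v hv
      by_cases hki : k = i
      · rw [hki, h.1] at hv
        cases hv
      · simp only []
        rw [if_neg hki]
        exact hv
    · have := UU_update n g i hi h.1 (fsuf l n zp op i)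
      omega

-- processing one node: fuel use is bounded by 3 × (number of states it memoizes) (+1 if already memoized)
lemma bloop_node (l n zp op : Nat) :
    ∀ m : Nat, ∀ i : Nat, n - i < m → i ≤ n →
    ∀ (g : Nat → Option Int) (rest : List Int) (fuel : Nat),
      BInv l n zp op g → 3 * UU n g + (n - i) + 1 ≤ fuel →
    ∃ g' fuel',
      bLoop (l:Int) (n:Int) ((zp:Int)+1) ((op:Int)+1) fuel (rngO (n+1) g) ((i:Int) :: rest)
        = bLoop (l:Int) (n:Int) ((zp:Int)+1) ((op:Int)+1) fuel' (rngO (n+1) g') rest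
      ∧ BInv l n zp op g'
      ∧ monoF g g'
      ∧ g' i = some (fsuf l n zp op i)
      ∧ UU n g' ≤ UU n g
      ∧ fuel ≤ fuel' + 3 * (UU n g - UU n g') + 1
      ∧ (g i = none → fuel ≤ fuel' + 3 * (UU n g - UU n g'))
      ∧ fuel' ≤ fuel
      ∧ (∀ k, k < i → g' k = g k) := by
  intro m
  induction m with
  | zero =>
    intro i him
    omega
  | succ m ihm =>
    intro i him hi g rest fuel hInv hfuel
    obtain ⟨f, rfl⟩ : ∃ f, fuel = f + 1 := ⟨fuel - 1, by omega⟩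
    by_cases hmem : (g i).isSome = true
    · obtain ⟨g', heq, hdis⟩ :=
        bloop_visit l n zp op i hi g rest f hInv
          (fun hnone _ => by rw [hnone] at hmem; cases hmem)
          (fun hnone _ => by rw [hnone] at hmem; cases hmem)
      obtain ⟨hinv', hmono', hget', hUle⟩ := visit_out l n zp op i hi g g' hInv hdis
      have hpres : ∀ k, k < i → g' k = g k := by
        intro k hk
        cases hdis with
        | inl h => rw [h.2]
        | inr h => rw [h.1] at hmem; cases hmem
      refine ⟨g', f, heq, hinv', hmono', hget', hUle, by omega,
        (by intro hnone; rw [hnone] at hmem; cases hmem), by omega, hpres⟩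
    · have hn : g i = none := by
        cases h : g i with
        | none => rfl
        | some v => rw [h] at hmem; exact absurd rfl hmem
      have hca : (i:Int) + ((zp:Int)+1) = ((i + (zp+1) : Nat) : Int) := by push_cast; ring
      have hcb : (i:Int) + ((op:Int)+1) = ((i + (op+1) : Nat) : Int) := by push_cast; ring
      have hUpos : 1 ≤ UU n g := UU_pos n g i hi hn
      have hqtrue : ∀ s : Nat, i + (s+1) ≤ n → g (i + (s+1)) = none →
          ((decide (((i + (s+1) : Nat) : Int) ≤ (n:Int))) && (mget (rngO (n+1) g) ((i + (s+1) : Nat) : Int)).isNone) = true := by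
        intro s hs hnone
        rw [decide_eq_true (by exact_mod_cast hs : ((i + (s+1) : Nat) : Int) ≤ (n:Int)),
            mget_rngO g (n+1) _ (by omega), hnone, Bool.true_and]
        rfl
      have hqfalse : ∀ s : Nat, ¬ (i + (s+1) ≤ n ∧ g (i + (s+1)) = none) →
          ((decide (((i + (s+1) : Nat) : Int) ≤ (n:Int))) && (mget (rngO (n+1) g) ((i + (s+1) : Nat) : Int)).isNone) = false := by
        intro s hq
        by_cases hs : i + (s+1) ≤ n
        · cases h : g (i + (s+1)) with
          | none => exact absurd ⟨hs, h⟩ hq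
          | some w =>
            have hno : (mget (rngO (n+1) g) ((i + (s+1) : Nat) : Int)).isNone = false := by
              rw [mget_rngO g (n+1) _ (by omega), h]
              rfl
            rw [hno, Bool.and_false]
        · rw [decide_eq_false (by push_cast; omega : ¬ ((i + (s+1) : Nat) : Int) ≤ (n:Int)), Bool.false_and]
      -- a dep not selected by the filter is resolved: if it is ≤ n it is memoized
      have hres : ∀ s : Nat, ¬ (i + (s+1) ≤ n ∧ g (i + (s+1)) = none) →
          ∀ (g1 : Nat → Option Int), monoF g g1 →
            i + (s+1) ≤ n → (g1 (i + (s+1))).isSome = true := by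
        intro s hq g1 hmono hs
        cases h : g (i + (s+1)) with
        | none => exact absurd ⟨hs, h⟩ hq
        | some w => rw [hmono _ _ h]; rfl
      by_cases qa : i + (zp+1) ≤ n ∧ g (i + (zp+1)) = none <;>
        by_cases qb : i + (op+1) ≤ n ∧ g (i + (op+1)) = none
      · -- both deps pushed: process (i+op+1) then (i+zp+1), then revisit i
        have hqa1 := qa.1
        have hqb1 := qb.1
        have hfilter : ([(i:Int) + ((zp:Int)+1), (i:Int) + ((op:Int)+1)].filter
            (fun j => decide (j ≤ (n:Int)) && (mget (rngO (n+1) g) j).isNone))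
              = [((i + (zp+1) : Nat) : Int), ((i + (op+1) : Nat) : Int)] := by
          rw [hca, hcb]
          simp only [List.filter, hqtrue zp qa.1 qa.2, hqtrue op qb.1 qb.2]
        have hstep := bLoop_step_expand (l:Int) (n:Int) ((zp:Int)+1) ((op:Int)+1) f (rngO (n+1) g) (i:Int) rest
          (by rw [mget_rngO g (n+1) i (by omega), hn])
          (by rw [hfilter]; exact List.cons_ne_nil _ _)
        rw [hfilter] at hstep
        simp only [List.reverse_cons, List.reverse_nil, List.nil_append, List.cons_append] at hstep
        obtain ⟨g1, f1, heq1, hinv1, hmono1, hget1, hU1, _, hfb, hb2, hpres1⟩ :=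
          ihm (i + (op+1)) (by omega) qb.1 g (((i + (zp+1) : Nat) : Int) :: (i:Int) :: rest) f hInv (by omega)
        have hfb' := hfb qb.2
        obtain ⟨g2, f2, heq2, hinv2, hmono2, hget2, hU2, hfc, _, hc2, hpres2⟩ :=
          ihm (i + (zp+1)) (by omega) qa.1 g1 ((i:Int) :: rest) f1 hinv1 (by omega)
        have hn2 : g2 i = none := by
          rw [hpres2 i (by omega), hpres1 i (by omega), hn]
        have hU2pos : 1 ≤ UU n g2 := UU_pos n g2 i hi hn2
        obtain ⟨f3, rfl⟩ : ∃ f3, f2 = f3 + 1 := ⟨f2 - 1, by omega⟩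
        obtain ⟨g3, heq3, hdis3⟩ :=
          bloop_visit l n zp op i hi g2 rest f3 hinv2
            (fun _ _ => by rw [hget2]; rfl)
            (fun _ _ => by rw [hmono2 _ _ hget1]; rfl)
        obtain ⟨hinv3, hmono3, hget3, hU3⟩ := visit_out l n zp op i hi g2 g3 hinv2 hdis3
        have hU3' : UU n g3 + 1 = UU n g2 := by
          cases hdis3 with
          | inl h => rw [h.1] at hn2; cases hn2
          | inr h =>
            rw [h.2]
            exact UU_update n g2 i hi h.1 _
        have hpres3 : ∀ k, k < i → g3 k = g k := by
          intro k hk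
          have : g3 k = g2 k := by
            cases hdis3 with
            | inl h => rw [h.2]
            | inr h =>
              rw [h.2]
              simp only []
              rw [if_neg (by omega : ¬ k = i)]
          rw [this, hpres2 k (by omega), hpres1 k (by omega)]
        refine ⟨g3, f3, ?_, hinv3, fun k v h => hmono3 _ _ (hmono2 _ _ (hmono1 _ _ h)), hget3,
          by omega, by omega, fun _ => by omega, by omega, hpres3⟩
        rw [hstep, heq1, heq2, heq3]
      · -- only (i+zp+1) pushed
        have hqa1 := qa.1
        have hfilter : ([(i:Int) + ((zp:Int)+1), (i:Int) + ((op:Int)+1)].filter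
            (fun j => decide (j ≤ (n:Int)) && (mget (rngO (n+1) g) j).isNone))
              = [((i + (zp+1) : Nat) : Int)] := by
          rw [hca, hcb]
          simp only [List.filter, hqtrue zp qa.1 qa.2, hqfalse op qb]
        have hstep := bLoop_step_expand (l:Int) (n:Int) ((zp:Int)+1) ((op:Int)+1) f (rngO (n+1) g) (i:Int) rest
          (by rw [mget_rngO g (n+1) i (by omega), hn])
          (by rw [hfilter]; exact List.cons_ne_nil _ _)
        rw [hfilter] at hstep
        simp only [List.reverse_cons, List.reverse_nil, List.nil_append, List.cons_append] at hstep
        obtain ⟨g1, f1, heq1, hinv1, hmono1, hget1, hU1, _, hfb, hb2, hpres1⟩ :=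
          ihm (i + (zp+1)) (by omega) qa.1 g ((i:Int) :: rest) f hInv (by omega)
        have hfb' := hfb qa.2
        have hn1 : g1 i = none := by
          rw [hpres1 i (by omega), hn]
        have hU1pos : 1 ≤ UU n g1 := UU_pos n g1 i hi hn1
        obtain ⟨f2, rfl⟩ : ∃ f2, f1 = f2 + 1 := ⟨f1 - 1, by omega⟩
        obtain ⟨g2, heq2, hdis2⟩ :=
          bloop_visit l n zp op i hi g1 rest f2 hinv1
            (fun _ _ => by rw [hget1]; rfl)
            (fun _ hs => hres op qb g1 hmono1 hs)
        obtain ⟨hinv2, hmono2, hget2, hU2⟩ := visit_out l n zp op i hi g1 g2 hinv1 hdis2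
        have hU2' : UU n g2 + 1 = UU n g1 := by
          cases hdis2 with
          | inl h => rw [h.1] at hn1; cases hn1
          | inr h =>
            rw [h.2]
            exact UU_update n g1 i hi h.1 _
        have hpres2 : ∀ k, k < i → g2 k = g k := by
          intro k hk
          have : g2 k = g1 k := by
            cases hdis2 with
            | inl h => rw [h.2]
            | inr h =>
              rw [h.2]
              simp only []
              rw [if_neg (by omega : ¬ k = i)]
          rw [this, hpres1 k (by omega)]
        refine ⟨g2, f2, ?_, hinv2, fun k v h => hmono2 _ _ (hmono1 _ _ h), hget2,
          by omega, by omega, fun _ => by omega, by omega, hpres2⟩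
        rw [hstep, heq1, heq2]
      · -- only (i+op+1) pushed
        have hqb1 := qb.1
        have hfilter : ([(i:Int) + ((zp:Int)+1), (i:Int) + ((op:Int)+1)].filter
            (fun j => decide (j ≤ (n:Int)) && (mget (rngO (n+1) g) j).isNone))
              = [((i + (op+1) : Nat) : Int)] := by
          rw [hca, hcb]
          simp only [List.filter, hqfalse zp qa, hqtrue op qb.1 qb.2]
        have hstep := bLoop_step_expand (l:Int) (n:Int) ((zp:Int)+1) ((op:Int)+1) f (rngO (n+1) g) (i:Int) rest
          (by rw [mget_rngO g (n+1) i (by omega), hn])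
          (by rw [hfilter]; exact List.cons_ne_nil _ _)
        rw [hfilter] at hstep
        simp only [List.reverse_cons, List.reverse_nil, List.nil_append, List.cons_append] at hstep
        obtain ⟨g1, f1, heq1, hinv1, hmono1, hget1, hU1, _, hfb, hb2, hpres1⟩ :=
          ihm (i + (op+1)) (by omega) qb.1 g ((i:Int) :: rest) f hInv (by omega)
        have hfb' := hfb qb.2
        have hn1 : g1 i = none := by
          rw [hpres1 i (by omega), hn]
        have hU1pos : 1 ≤ UU n g1 := UU_pos n g1 i hi hn1
        obtain ⟨f2, rfl⟩ : ∃ f2, f1 = f2 + 1 := ⟨f1 - 1, by omega⟩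
        obtain ⟨g2, heq2, hdis2⟩ :=
          bloop_visit l n zp op i hi g1 rest f2 hinv1
            (fun _ hs => hres zp qa g1 hmono1 hs)
            (fun _ _ => by rw [hget1]; rfl)
        obtain ⟨hinv2, hmono2, hget2, hU2⟩ := visit_out l n zp op i hi g1 g2 hinv1 hdis2
        have hU2' : UU n g2 + 1 = UU n g1 := by
          cases hdis2 with
          | inl h => rw [h.1] at hn1; cases hn1
          | inr h =>
            rw [h.2]
            exact UU_update n g1 i hi h.1 _
        have hpres2 : ∀ k, k < i → g2 k = g k := by
          intro k hk
          have : g2 k = g1 k := by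
            cases hdis2 with
            | inl h => rw [h.2]
            | inr h =>
              rw [h.2]
              simp only []
              rw [if_neg (by omega : ¬ k = i)]
          rw [this, hpres1 k (by omega)]
        refine ⟨g2, f2, ?_, hinv2, fun k v h => hmono2 _ _ (hmono1 _ _ h), hget2,
          by omega, by omega, fun _ => by omega, by omega, hpres2⟩
        rw [hstep, heq1, heq2]
      · -- nothing to push: memoize i at once
        obtain ⟨g1, heq1, hdis1⟩ :=
          bloop_visit l n zp op i hi g rest f hInv
            (fun _ hs => hres zp qa g (fun _ _ h => h) hs)
            (fun _ hs => hres op qb g (fun _ _ h => h) hs)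
        obtain ⟨hinv1, hmono1, hget1, hU1⟩ := visit_out l n zp op i hi g g1 hInv hdis1
        have hU1' : UU n g1 + 1 = UU n g := by
          cases hdis1 with
          | inl h => rw [h.1] at hn; cases hn
          | inr h =>
            rw [h.2]
            exact UU_update n g i hi h.1 _
        have hpres1 : ∀ k, k < i → g1 k = g k := by
          intro k hk
          cases hdis1 with
          | inl h => rw [h.2]
          | inr h =>
              rw [h.2]
              simp only []
              rw [if_neg (by omega : ¬ k = i)]
        exact ⟨g1, f, heq1, hinv1, hmono1, hget1, by omega, by omega, fun _ => by omega, by omega, hpres1⟩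

lemma alt_eq (l n zp op : Nat) :
    countGoodStrings_alt (l:Int) (n:Int) ((zp:Int)+1) ((op:Int)+1) = fsuf l n zp op 0 := by
  unfold countGoodStrings_alt
  have hUinit : UU n (fun _ => none) ≤ n + 1 := by
    unfold UU
    calc (List.range (n+1)).countP _ ≤ (List.range (n+1)).length := List.countP_le_length
    _ = n + 1 := List.length_range
  have hfuel : 3 * UU n (fun _ => none) + (n - 0) + 1 ≤ (4 * ((n:Int) + 2)).toNat := by
    have : (4 * ((n:Int) + 2)).toNat = 4 * n + 8 := by omega
    omega
  obtain ⟨g', fuel', heq, _, _, hget, _, _, _, _, _⟩ :=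
    bloop_node l n zp op (n+1) 0 (by omega) (by omega) (fun _ => none) []
      ((4 * ((n:Int) + 2)).toNat)
      (fun k hk v hv => by cases hv)
      hfuel
  simp only [Nat.cast_zero] at heq
  have hm0 := mget_rngO g' (n+1) 0 (by omega)
  simp only [Nat.cast_zero] at hm0
  show (mget (bLoop (l:Int) (n:Int) ((zp:Int)+1) ((op:Int)+1) ((4 * ((n:Int) + 2)).toNat)
      (Array.replicate (((n:Int)) + 1).toNat none) [(0:Int)]) 0).getD 0 = fsuf l n zp op 0
  rw [show (((n:Int)) + 1).toNat = n + 1 by omega, rngO_init (n+1), heq, bLoop_nil, hm0, hget,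
      Option.getD_some]

-- ---------- assembling the equivalence ----------
lemma main_nat (l n zp op : Nat) :
    countGoodStrings (l:Int) (n:Int) ((zp:Int)+1) ((op:Int)+1)
      = countGoodStrings_alt (l:Int) (n:Int) ((zp:Int)+1) ((op:Int)+1) := by
  have hz : ((zp:Int)+1) = (((zp+1:Nat)):Int) := by push_cast; ring
  have ho : ((op:Int)+1) = (((op+1:Nat)):Int) := by push_cast; ring
  rw [alt_eq, fsuf_eq_usum, usum_eq_vsum l zp op n 0 (by omega), vsum_zero, hz, ho,
      A_eq l n (zp+1) (op+1) (by omega) (by omega), aacc_eq_tsumB]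

-- ===== VERDICT (by name: the statement is the Claim_ definition above) =====
theorem countGoodStrings_spec : Claim_equal_countGoodStrings := by
  intro low high zero one _ hpre
  obtain ⟨hl, hh, hz, ho⟩ := hpre
  unfold Spec_countGoodStrings
  have el : low = ((low.toNat : Nat) : Int) := (Int.toNat_of_nonneg hl).symm
  have eh : high = ((high.toNat : Nat) : Int) := (Int.toNat_of_nonneg hh).symm
  have ez : zero = (((zero - 1).toNat : Nat) : Int) + 1 := by omega
  have eo : one = (((one - 1).toNat : Nat) : Int) + 1 := by omega
  rw [el, eh, ez, eo]
  exact main_nat low.toNat high.toNat (zero - 1).toNat (one - 1).toNat
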